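-- pv_equiv track=rewrite | github.com/JoeLove100/data-structures-and-algorithms | data_structures/prioritiy_queues/scheduler.py | assign_jobs_slow
-- ===== SOURCE A (Python) =====
-- from collections import namedtuple, deque
--
-- AssignedJob = namedtuple("AssignedJob", ["worker", "started_at"])
--
-- def assign_jobs_slow(n_workers, jobs):
--     # TODO: replace this code with a faster algorithm.
--     result = []
--     next_free_time = [0] * n_workers
--     for job in jobs:
--         next_worker = min(range(n_workers), key=lambda w: next_free_time[w])
--         result.append(AssignedJob(next_worker, next_free_time[next_worker]))
--         next_free_time[next_worker] += job
--
--     return result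
-- ===== SOURCE B (Python) =====
-- from collections import namedtuple
--
-- AssignedJob = namedtuple("AssignedJob", ["worker", "started_at"])
--
--
-- def assign_jobs_slow(n_workers, jobs):
--     # Keep the workers in a list of (free_time, worker) pairs sorted
--     # ascending: the next worker is always the first pair, no scan needed.
--     avail = [(0, w) for w in range(n_workers)]
--     result = []
--     for job in jobs:
--         t, w = avail.pop(0)
--         result.append(AssignedJob(w, t))
--         item = (t + job, w)
--         j = 0
--         while j < len(avail) and avail[j] < item:
--             j += 1
--         avail.insert(j, item)
--     return result
-- ===== Notes on version B (the rewrite author's own statement) =====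
-- stated objective: alternative
-- what changed: B replaces A's per-job keyed min-scan over all workers with an ordered list of (free_time, worker) pairs: the next worker is popped from the front and re-inserted at its sorted position, so no argmin scan exists.
import Mathlib
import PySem

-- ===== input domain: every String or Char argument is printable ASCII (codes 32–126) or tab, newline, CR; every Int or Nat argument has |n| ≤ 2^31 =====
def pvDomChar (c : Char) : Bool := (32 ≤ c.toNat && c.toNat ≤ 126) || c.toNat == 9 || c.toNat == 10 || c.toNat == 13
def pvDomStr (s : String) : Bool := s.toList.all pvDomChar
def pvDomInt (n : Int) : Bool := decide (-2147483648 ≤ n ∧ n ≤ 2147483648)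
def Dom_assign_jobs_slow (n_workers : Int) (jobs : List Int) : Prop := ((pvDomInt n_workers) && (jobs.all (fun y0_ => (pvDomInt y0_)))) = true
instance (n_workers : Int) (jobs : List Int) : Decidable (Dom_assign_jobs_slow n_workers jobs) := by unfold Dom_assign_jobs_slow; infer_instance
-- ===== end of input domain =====

-- B replaces A's per-job argmin scan by an ordered list of (free_time, worker) pairs
-- (pop the front, re-insert at the sorted position); same outputs, no speed claim.

-- ===== PORT A =====
-- min(range(n_workers), key=lambda w: next_free_time[w]) keeps the FIRST minimal index
def pvArgmin (fts : List Int) : Nat :=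
  (List.range fts.length).foldl
    (fun best w => if fts.getD w 0 < fts.getD best 0 then w else best) 0

def pvALoop (fts : List Int) : List Int → List (Int × Int)
  | [] => []
  | job :: rest =>
    ((pvArgmin fts : Int), fts.getD (pvArgmin fts) 0) ::
      pvALoop (fts.set (pvArgmin fts) (fts.getD (pvArgmin fts) 0 + job)) rest

def assign_jobs_slow (n_workers : Int) (jobs : List Int) : List (Int × Int) :=
  pvALoop (List.replicate n_workers.toNat 0) jobs

-- ===== PORT B =====
-- the while-loop + list.insert of Source B: insert before the first element not < item
def pvInsertSorted (item : Int × Int) : List (Int × Int) → List (Int × Int)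
  | [] => [item]
  | q :: rest =>
    if q.1 < item.1 ∨ (q.1 = item.1 ∧ q.2 < item.2) then q :: pvInsertSorted item rest
    else item :: q :: rest

def pvBLoop (avail : List (Int × Int)) : List Int → List (Int × Int)
  | [] => []
  | job :: rest =>
    match avail with
    | [] => []   -- Python raises IndexError here (only reachable with n_workers ≤ 0); outside Pre_
    | (t, w) :: tl => (w, t) :: pvBLoop (pvInsertSorted (t + job, w) tl) rest

def assign_jobs_slow_alt (n_workers : Int) (jobs : List Int) : List (Int × Int) :=
  pvBLoop ((List.range n_workers.toNat).map (fun (w : Nat) => ((0 : Int), (w : Int)))) jobs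

-- ===== PRECONDITION & SPEC =====
-- With jobs nonempty and n_workers ≤ 0 both programs raise (A: ValueError from min() on an
-- empty range; B: IndexError from pop on an empty list); Pre_ excludes exactly those inputs.
def Pre_assign_jobs_slow (n_workers : Int) (jobs : List Int) : Prop :=
  jobs = [] ∨ 1 ≤ n_workers
instance (n_workers : Int) (jobs : List Int) : Decidable (Pre_assign_jobs_slow n_workers jobs) := by
  unfold Pre_assign_jobs_slow; infer_instance
def pvWitness_assign_jobs_slow : Int × List Int := (2, [3, 1, 4])

def Spec_assign_jobs_slow (n_workers : Int) (jobs : List Int) (out : List (Int × Int)) : Prop := out = assign_jobs_slow_alt n_workers jobs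
instance (n_workers : Int) (jobs : List Int) (out : List (Int × Int)) : Decidable (Spec_assign_jobs_slow n_workers jobs out) := by unfold Spec_assign_jobs_slow; infer_instance

-- ===== CLAIM (what is proved, stated in full; the proofs are below) =====
def Claim_equal_assign_jobs_slow : Prop := ∀ (n_workers : Int) (jobs : List Int), Dom_assign_jobs_slow n_workers jobs → Pre_assign_jobs_slow n_workers jobs → Spec_assign_jobs_slow n_workers jobs (assign_jobs_slow n_workers jobs)

-- ===== LEMMAS AND PROOFS =====

-- lexicographic ≤ on (time, worker) pairs: the order both programs select by
def pvLe (p q : Int × Int) : Prop := p.1 < q.1 ∨ (p.1 = q.1 ∧ p.2 ≤ q.2)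

-- (time, worker) pairs of a free-time list, workers numbered from k
def pvEnum (k : Int) : List Int → List (Int × Int)
  | [] => []
  | t :: ts => (t, k) :: pvEnum (k + 1) ts

lemma pvLe_refl (p : Int × Int) : pvLe p p := by simp [pvLe]

lemma pvLe_trans {p q r : Int × Int} (h1 : pvLe p q) (h2 : pvLe q r) : pvLe p r := by
  unfold pvLe at *; omega

lemma pvLe_total_of_not_lt {p q : Int × Int}
    (h : ¬ (p.1 < q.1 ∨ (p.1 = q.1 ∧ p.2 < q.2))) : pvLe q p := by
  unfold pvLe; omega

lemma pvEnum_length (k : Int) (ts : List Int) : (pvEnum k ts).length = ts.length := by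
  induction ts generalizing k with
  | nil => rfl
  | cons t ts ih => simp [pvEnum, ih]

lemma pvEnum_getElem (k : Int) (ts : List Int) (j : Nat) (h : j < ts.length) :
    (pvEnum k ts)[j]'(by rw [pvEnum_length]; exact h) = (ts[j], k + j) := by
  induction ts generalizing k j with
  | nil => simp at h
  | cons t ts ih =>
    cases j with
    | zero => simp [pvEnum]
    | succ j =>
      simp only [pvEnum, List.getElem_cons_succ]
      rw [ih (k + 1) j (by simpa using h)]
      simp; ring

lemma mem_pvEnum {k : Int} {ts : List Int} {p : Int × Int} :
    p ∈ pvEnum k ts ↔ ∃ j, ∃ h : j < ts.length, p = (ts[j], k + j) := by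
  constructor
  · intro hp
    rw [List.mem_iff_getElem] at hp
    obtain ⟨j, hj, he⟩ := hp
    have hj' : j < ts.length := by rwa [pvEnum_length] at hj
    exact ⟨j, hj', by rw [← he, pvEnum_getElem k ts j hj']⟩
  · rintro ⟨j, hj, rfl⟩
    rw [List.mem_iff_getElem]
    exact ⟨j, by rw [pvEnum_length]; exact hj, pvEnum_getElem k ts j hj⟩

lemma pvEnum_set (k : Int) (ts : List Int) (j : Nat) (v : Int) (h : j < ts.length) :
    pvEnum k (ts.set j v) = (pvEnum k ts).set j (v, k + j) := by
  induction ts generalizing k j with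
  | nil => simp at h
  | cons t ts ih =>
    cases j with
    | zero => simp [pvEnum]
    | succ j =>
      simp only [List.set_cons_succ, pvEnum, List.set]
      rw [ih (k + 1) j (by simpa using h)]
      congr 2
      simp only [Prod.mk.injEq, true_and]
      push_cast
      ring

-- A's min(range(n), key=…) returns the first index of the minimum:
-- its (value, index) pair is pvLe-below the pair of every index
lemma pvArgmin_spec (fts : List Int) (hne : fts ≠ []) :
    pvArgmin fts < fts.length ∧
      ∀ j < fts.length, pvLe (fts.getD (pvArgmin fts) 0, (pvArgmin fts : Int)) (fts.getD j 0, (j : Int)) := by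
  have key : ∀ n, 0 < n → n ≤ fts.length →
      (List.range n).foldl (fun best w => if fts.getD w 0 < fts.getD best 0 then w else best) 0 < n ∧
      ∀ j < n, pvLe (fts.getD ((List.range n).foldl (fun best w => if fts.getD w 0 < fts.getD best 0 then w else best) 0) 0,
        (((List.range n).foldl (fun best w => if fts.getD w 0 < fts.getD best 0 then w else best) 0 : Nat) : Int))
        (fts.getD j 0, (j : Int)) := by
    intro n
    induction n with
    | zero => intro h; omega
    | succ n ih =>
      intro _ hle
      rw [List.range_succ, List.foldl_append]
      rcases Nat.eq_zero_or_pos n with h0 | hpos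
      · subst h0
        simp only [List.range_zero, List.foldl_nil, List.foldl_cons]
        rw [if_neg (lt_irrefl _)]
        refine ⟨by omega, ?_⟩
        intro j hj
        have hj0 : j = 0 := by omega
        subst hj0
        exact pvLe_refl _
      · obtain ⟨hb, hmin⟩ := ih hpos (by omega)
        set b := (List.range n).foldl (fun best w => if fts.getD w 0 < fts.getD best 0 then w else best) 0 with hbdef
        simp only [List.foldl_cons, List.foldl_nil]
        by_cases hc : fts.getD n 0 < fts.getD b 0
        · rw [if_pos hc]
          refine ⟨by omega, ?_⟩
          intro j hj
          rcases Nat.lt_succ_iff_lt_or_eq.mp hj with hj' | rfl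
          · have := hmin j hj'
            unfold pvLe at *; omega
          · exact pvLe_refl _
        · rw [if_neg hc]
          refine ⟨by omega, ?_⟩
          intro j hj
          rcases Nat.lt_succ_iff_lt_or_eq.mp hj with hj' | rfl
          · exact hmin j hj'
          · unfold pvLe
            push_cast
            omega
  have hlen : 0 < fts.length := List.length_pos_iff.mpr hne
  exact key fts.length hlen le_rfl

-- the head of a sorted list is a pvLe-minimum of any list it is a permutation of
lemma sorted_head_min {p : Int × Int} {tl m : List (Int × Int)}
    (hs : (p :: tl).Pairwise pvLe) (hperm : (p :: tl).Perm m) :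
    p ∈ m ∧ ∀ q ∈ m, pvLe p q := by
  refine ⟨hperm.mem_iff.mp (by simp), ?_⟩
  intro q hq
  have : q ∈ p :: tl := hperm.mem_iff.mpr hq
  rcases List.mem_cons.mp this with rfl | hq'
  · exact pvLe_refl _
  · exact List.rel_of_pairwise_cons hs hq'

lemma pvInsertSorted_perm (item : Int × Int) (l : List (Int × Int)) :
    (pvInsertSorted item l).Perm (item :: l) := by
  induction l with
  | nil => exact List.Perm.refl _
  | cons q rest ih =>
    unfold pvInsertSorted
    split
    · exact (ih.cons q).trans (List.Perm.swap item q rest)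
    · exact List.Perm.refl _

lemma pvInsertSorted_sorted (item : Int × Int) (l : List (Int × Int))
    (hs : l.Pairwise pvLe) : (pvInsertSorted item l).Pairwise pvLe := by
  induction l with
  | nil => simp [pvInsertSorted]
  | cons q rest ih =>
    obtain ⟨hq, hrest⟩ := List.pairwise_cons.mp hs
    unfold pvInsertSorted
    split
    · rename_i hlt
      rw [List.pairwise_cons]
      refine ⟨?_, ih hrest⟩
      intro y hy
      have : y ∈ item :: rest := (pvInsertSorted_perm item rest).mem_iff.mp hy
      rcases List.mem_cons.mp this with rfl | hy'
      · unfold pvLe; omega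
      · exact hq y hy'
    · rename_i hnlt
      rw [List.pairwise_cons]
      refine ⟨?_, hs⟩
      intro y hy
      have hip : pvLe item q := pvLe_total_of_not_lt hnlt
      rcases List.mem_cons.mp hy with rfl | hy'
      · exact hip
      · exact pvLe_trans hip (hq y hy')

lemma set_perm_cons_eraseIdx {α : Type} (m : List α) (a : Nat) (q : α) (h : a < m.length) :
    (m.set a q).Perm (q :: m.eraseIdx a) := by
  induction m generalizing a with
  | nil => simp at h
  | cons x xs ih =>
    cases a with
    | zero => simp
    | succ a =>
      simp only [List.set_cons_succ, List.eraseIdx_cons_succ]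
      exact ((ih a (by simpa using h)).cons x).trans (List.Perm.swap q x _)

-- B's initial list is exactly pvEnum of A's initial free-time list
lemma pvEnum_replicate (m : Nat) (k : Int) :
    pvEnum k (List.replicate m 0) = (List.range m).map (fun (w : Nat) => ((0 : Int), k + (w : Int))) := by
  induction m generalizing k with
  | zero => rfl
  | succ m ih =>
    rw [List.replicate_succ, List.range_succ_eq_map]
    simp only [pvEnum, List.map_cons, List.map_map]
    rw [ih (k + 1)]
    congr 1
    · simp
    · congr 1
      funext w
      simp only [Function.comp_apply]
      push_cast
      congr 1
      ring

lemma pvEnum_replicate_sorted (m : Nat) (k : Int) :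
    (pvEnum k (List.replicate m 0)).Pairwise pvLe := by
  induction m generalizing k with
  | zero => simp [pvEnum]
  | succ m ih =>
    rw [List.replicate_succ]
    simp only [pvEnum]
    rw [List.pairwise_cons]
    refine ⟨?_, ih (k + 1)⟩
    intro y hy
    obtain ⟨j, hj, rfl⟩ := mem_pvEnum.mp hy
    simp only [List.getElem_replicate]
    unfold pvLe
    right
    refine ⟨rfl, ?_⟩
    have : (0 : Int) ≤ (j : Int) := Int.natCast_nonneg j
    omega

-- main loop invariant: B's list is a sorted permutation of (free_time, worker) pairs
lemma loop_eq : ∀ (jobs fts : List Int) (l : List (Int × Int)),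
    fts ≠ [] → l.Pairwise pvLe → l.Perm (pvEnum 0 fts) →
    pvALoop fts jobs = pvBLoop l jobs := by
  intro jobs
  induction jobs with
  | nil => intro fts l _ _ _; cases l <;> rfl
  | cons job rest ih =>
    intro fts l hne hs hperm
    have hflen : 0 < fts.length := List.length_pos_iff.mpr hne
    have hlne : l ≠ [] := by
      intro h
      subst h
      have := hperm.length_eq
      rw [pvEnum_length] at this
      simp at this
      omega
    obtain ⟨p, tl, rfl⟩ := List.exists_cons_of_ne_nil hlne
    obtain ⟨ha, hamin⟩ := pvArgmin_spec fts hne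
    set a := pvArgmin fts with hadef
    -- identify the head p as (fts[a], a), the pair A selects
    obtain ⟨hpmem, hpmin⟩ := sorted_head_min hs hperm
    obtain ⟨i, hi, hpe⟩ := mem_pvEnum.mp hpmem
    have hpe' : p = (fts[i], (i : Int)) := by rw [hpe]; simp
    have hamem : ((fts[a], (a : Int)) : Int × Int) ∈ pvEnum 0 fts := by
      have h0 : ((fts[a], (0 : Int) + (a : Int)) : Int × Int) ∈ pvEnum 0 fts :=
        mem_pvEnum.mpr ⟨a, ha, rfl⟩
      simpa using h0
    have h1 : pvLe (fts[i], (i : Int)) (fts[a], (a : Int)) := by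
      rw [← hpe']; exact hpmin _ hamem
    have h2 := hamin i hi
    have h3 := hamin a ha
    rw [List.getD_eq_getElem fts 0 ha, List.getD_eq_getElem fts 0 hi] at h2
    have hieq : i = a := by
      unfold pvLe at h1 h2
      simp only at h1 h2
      omega
    subst hieq
    have hgd : fts.getD a 0 = fts[a] := List.getD_eq_getElem fts 0 ha
    obtain ⟨pt, pw⟩ := p
    have hpt : pt = fts[a] := by simpa using congrArg Prod.fst hpe'
    have hpw : pw = (a : Int) := by simpa using congrArg Prod.snd hpe'
    subst hpt hpw
    simp only [pvALoop, pvBLoop]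
    rw [hgd]
    congr 1
    -- the recursive step: apply the IH to the updated state
    set q : Int × Int := (fts[a] + job, (a : Int)) with hqdef
    have hmset : pvEnum 0 (fts.set a (fts[a] + job)) = (pvEnum 0 fts).set a q := by
      rw [pvEnum_set 0 fts a (fts[a] + job) ha]
      simp [hqdef]
    have halen : a < (pvEnum 0 fts).length := by rw [pvEnum_length]; exact ha
    have hma : (pvEnum 0 fts)[a]'halen = (fts[a], (a : Int)) := by
      rw [pvEnum_getElem 0 fts a ha]; simp
    have hm_eq : (pvEnum 0 fts).set a (fts[a], (a : Int)) = pvEnum 0 fts := by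
      rw [← hma, List.set_getElem_self]
    have h5 : ((pvEnum 0 fts).set a ((fts[a], (a : Int)) : Int × Int)).Perm
        ((fts[a], (a : Int)) :: (pvEnum 0 fts).eraseIdx a) :=
      set_perm_cons_eraseIdx _ a _ halen
    rw [hm_eq] at h5
    have htl : tl.Perm ((pvEnum 0 fts).eraseIdx a) := (hperm.trans h5).cons_inv
    apply ih
    · simp only [ne_eq, ← List.length_eq_zero_iff, List.length_set]
      omega
    · exact pvInsertSorted_sorted q tl (List.pairwise_cons.mp hs).2
    · refine (pvInsertSorted_perm q tl).trans ?_
      refine (htl.cons q).trans ?_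
      rw [hmset]
      exact (set_perm_cons_eraseIdx _ a q halen).symm

-- ===== VERDICT (by name: the statement is the Claim_ definition above) =====
theorem assign_jobs_slow_spec : Claim_equal_assign_jobs_slow := by
  intro n_workers jobs _ hpre
  unfold Spec_assign_jobs_slow assign_jobs_slow assign_jobs_slow_alt
  rcases hpre with rfl | hn
  · rfl
  · have hinit : (List.range n_workers.toNat).map (fun (w : Nat) => ((0 : Int), (w : Int))) =
        pvEnum 0 (List.replicate n_workers.toNat 0) := by
      rw [pvEnum_replicate]
      simp
    rw [hinit]
    apply loop_eq
    · simp only [ne_eq, List.replicate_eq_nil_iff]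
      omega
    · exact pvEnum_replicate_sorted _ 0
    · exact List.Perm.refl _
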